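-- pv_equiv track=rewrite | github.com/barrettMCW/omero-upload-csv | omero-upload-csv.py | merge_key_values
-- ===== SOURCE A (Python) =====
-- from typing import Dict, List, Optional, Tuple
--
-- def merge_key_values(existing: Dict[str, str], additions: Dict[str, str]) -> Tuple[Dict[str, str], bool]:
--     """Merge additions into existing and report whether anything changed."""
--     merged = existing.copy()
--     changed = False
--     for key, value in additions.items():
--         new_value = str(value)
--         if merged.get(key) != new_value:
--             merged[key] = new_value
--             changed = True
--     return merged, changed
-- ===== SOURCE B (Python) =====
-- def merge_key_values(existing, additions):
--     """Merge additions into existing and report whether anything changed."""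
--     # Stage 1: the delta = the additions that actually take effect.
--     delta = {k: str(v) for k, v in additions.items() if existing.get(k) != str(v)}
--     # Stage 2: rebuild — existing entries with delta overrides, then the brand-new keys.
--     merged = {k: delta.get(k, v) for k, v in existing.items()}
--     merged.update((k, v) for k, v in delta.items() if k not in existing)
--     return merged, bool(delta)
-- ===== Notes on version B (the rewrite author's own statement) =====
-- stated objective: alternative
-- what changed: Instead of A's single mutating loop with a change flag, B first computes the delta dict of additions that actually take effect, then rebuilds the merged dict declaratively (existing entries with delta overrides, then the fresh delta keys appended) and reports change as the delta being nonempty; Pre_ only excludes association lists whose keys repeat, which cannot arise from a Python dict argument.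
import Mathlib
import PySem

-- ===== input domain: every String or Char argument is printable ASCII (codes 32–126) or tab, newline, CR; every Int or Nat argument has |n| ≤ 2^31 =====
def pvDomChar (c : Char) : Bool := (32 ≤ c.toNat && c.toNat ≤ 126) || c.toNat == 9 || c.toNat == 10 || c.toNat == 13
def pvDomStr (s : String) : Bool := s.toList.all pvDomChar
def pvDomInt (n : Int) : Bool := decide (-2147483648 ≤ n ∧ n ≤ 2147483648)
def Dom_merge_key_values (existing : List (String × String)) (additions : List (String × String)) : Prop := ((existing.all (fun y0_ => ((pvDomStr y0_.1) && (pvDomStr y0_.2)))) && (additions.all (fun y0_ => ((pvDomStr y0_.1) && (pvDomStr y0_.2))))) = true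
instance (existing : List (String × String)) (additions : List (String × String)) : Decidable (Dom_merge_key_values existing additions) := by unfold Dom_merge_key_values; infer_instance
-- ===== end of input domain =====

-- B computes the effective delta of the additions first, rebuilds the merged dict
-- declaratively from it, and reports change as the delta being nonempty (objective: alternative).


-- ===== PORT A =====
-- one iteration of A's loop over additions.items(): state = (merged, changed);
-- str(value) on a str is the value itself
def mergeStepA (st : PySem.Dict String String × Bool) (kv : String × String) :
    PySem.Dict String String × Bool :=
  let new_value := kv.2
  if st.1.get? kv.1 ≠ some new_value then (st.1.insert kv.1 new_value, true) else st

def merge_key_values (existing : List (String × String)) (additions : List (String × String)) : (List (String × String)) × Bool :=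
  let r := additions.foldl mergeStepA (PySem.Dict.mk existing, false)
  (r.1.items, r.2)

-- ===== PORT B =====
def merge_key_values_alt (existing : List (String × String)) (additions : List (String × String)) : (List (String × String)) × Bool :=
  let e := PySem.Dict.mk existing
  -- delta = {k: str(v) for k, v in additions.items() if existing.get(k) != str(v)}
  let delta := PySem.Dict.mk (additions.filter (fun kv => decide (e.get? kv.1 ≠ some kv.2)))
  -- merged = {k: delta.get(k, v) for k, v in existing.items()}
  let merged0 := PySem.Dict.mk (existing.map (fun kv => (kv.1, delta.getD kv.1 kv.2)))
  -- merged.update((k, v) for k, v in delta.items() if k not in existing)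
  let merged := (delta.items.filter (fun kv => !e.contains kv.1)).foldl
    (fun d kv => d.insert kv.1 kv.2) merged0
  (merged.items, decide (delta.items ≠ []))

-- ===== PRECONDITION & SPEC =====
-- Pre_ excludes association lists with REPEATED keys: those do not represent any Python
-- dict (A's and B's Python arguments are dicts, whose keys are unique), so on them the
-- ports' behaviour corresponds to no Python run; every dict-representable input is admitted.
def Pre_merge_key_values (existing : List (String × String)) (additions : List (String × String)) : Prop :=
  (existing.map Prod.fst).Nodup ∧ (additions.map Prod.fst).Nodup
instance (existing : List (String × String)) (additions : List (String × String)) : Decidable (Pre_merge_key_values existing additions) := by unfold Pre_merge_key_values; infer_instance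

def pvWitness_merge_key_values : (List (String × String)) × (List (String × String)) :=
  ([("a", "1"), ("b", "2")], [("b", "3"), ("c", "4")])

def Spec_merge_key_values (existing : List (String × String)) (additions : List (String × String)) (out : (List (String × String)) × Bool) : Prop := out = merge_key_values_alt existing additions
instance (existing : List (String × String)) (additions : List (String × String)) (out : (List (String × String)) × Bool) : Decidable (Spec_merge_key_values existing additions out) := by unfold Spec_merge_key_values; infer_instance

-- ===== CLAIM (what is proved, stated in full; the proofs are below) =====
def Claim_equal_merge_key_values : Prop := ∀ (existing : List (String × String)) (additions : List (String × String)), Dom_merge_key_values existing additions → Pre_merge_key_values existing additions → Spec_merge_key_values existing additions (merge_key_values existing additions)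

-- ===== LEMMAS AND PROOFS =====

-- inserting the value a key already has leaves the dict unchanged
lemma insert_get_self (d : PySem.Dict String String) (k v : String)
    (hnd : d.keys.Nodup) (h : d.get? k = some v) : d.insert k v = d := by
  have hc : d.contains k = true := by
    rw [PySem.Dict.contains_eq_isSome_get?, h]; rfl
  apply PySem.Dict.ext
  rw [PySem.Dict.items_insert_of_contains d v hc]
  have : ∀ p ∈ d.items, (if (p.1 == k) = true then (k, v) else p) = id p := by
    rintro ⟨pk, pv⟩ hp
    by_cases hk : pk = k
    · have hv : d.get? pk = some pv := PySem.Dict.get?_of_mem_items d hp hnd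
      rw [hk, h] at hv
      simp [hk, Option.some_inj.mp hv]
    · simp [hk]
  rw [List.map_congr_left this, List.map_id]

-- A's flag-tracking loop equals a plain insert-fold paired with an `any` over additions
lemma loopA_eq (e : PySem.Dict String String) :
    ∀ (l : List (String × String)) (m : PySem.Dict String String) (c : Bool),
      m.keys.Nodup → (l.map Prod.fst).Nodup →
      (∀ p ∈ l, m.get? p.1 = e.get? p.1) →
      l.foldl mergeStepA (m, c) =
        (l.foldl (fun d kv => d.insert kv.1 kv.2) m,
         c || l.any (fun kv => decide (e.get? kv.1 ≠ some kv.2))) := by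
  intro l
  induction l with
  | nil => intro m c _ _ _; simp
  | cons kv t ih =>
    intro m c hm hl h1
    simp only [List.map_cons, List.nodup_cons] at hl
    have hkv : m.get? kv.1 = e.get? kv.1 := h1 kv List.mem_cons_self
    by_cases hfire : e.get? kv.1 = some kv.2
    · have hA : mergeStepA (m, c) kv = (m, c) := by
        simp [mergeStepA, hkv, hfire]
      have hB : m.insert kv.1 kv.2 = m := insert_get_self m kv.1 kv.2 hm (hkv.trans hfire)
      simp only [List.foldl_cons, List.any_cons, hA, hB]
      rw [ih m c hm hl.2 (fun p hp => h1 p (List.mem_cons_of_mem _ hp))]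
      simp [hfire]
    · have hA : mergeStepA (m, c) kv = (m.insert kv.1 kv.2, true) := by
        simp [mergeStepA, hkv, hfire]
      simp only [List.foldl_cons, List.any_cons, hA]
      rw [ih (m.insert kv.1 kv.2) true (PySem.Dict.nodup_keys_insert _ _ _ hm) hl.2]
      · simp [hfire]
      · intro p hp
        have hne : p.1 ≠ kv.1 := fun hc => hl.1 (hc ▸ List.mem_map_of_mem hp)
        rw [PySem.Dict.get?_insert_of_ne m kv.2 hne]
        exact h1 p (List.mem_cons_of_mem _ hp)

-- a plain insert-fold over distinct keys: existing entries get overridden, fresh keys append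
lemma foldl_insert_items :
    ∀ (l : List (String × String)) (m : PySem.Dict String String),
      m.keys.Nodup → (l.map Prod.fst).Nodup →
      (l.foldl (fun d kv => d.insert kv.1 kv.2) m).items =
        m.items.map (fun p => (p.1, (PySem.Dict.mk l).getD p.1 p.2))
          ++ l.filter (fun kv => !m.contains kv.1) := by
  intro l
  induction l with
  | nil =>
    intro m _ _
    simp [PySem.Dict.getD_eq_get?_getD, PySem.Dict.get?]
  | cons kv t ih =>
    obtain ⟨ka, va⟩ := kv
    intro m hm hl
    simp only [List.map_cons, List.nodup_cons] at hl
    have hknt : ∀ p ∈ t, p.1 ≠ ka := fun p hp hc => hl.1 (hc ▸ List.mem_map_of_mem hp)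
    have hgt : ∀ (v0 : String), (PySem.Dict.mk t).getD ka v0 = v0 := by
      intro v0
      apply PySem.Dict.getD_of_not_contains
      rw [PySem.Dict.contains_eq_decide_mem_keys]
      simp only [PySem.Dict.keys, decide_eq_false_iff_not]
      intro hmem
      obtain ⟨p, hp, hpe⟩ := List.mem_map.mp hmem
      exact hknt p hp hpe
    have hDcons : ∀ (k0 v0 : String), k0 ≠ ka →
        (PySem.Dict.mk ((ka, va) :: t)).getD k0 v0 = (PySem.Dict.mk t).getD k0 v0 := by
      intro k0 v0 hne
      simp [PySem.Dict.getD_eq_get?_getD, PySem.Dict.get?_mk_cons,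
        beq_iff_eq, Ne.symm hne]
    simp only [List.foldl_cons]
    by_cases hc : m.contains ka
    · rw [ih (m.insert ka va) (PySem.Dict.nodup_keys_insert _ _ _ hm) hl.2]
      rw [PySem.Dict.items_insert_of_contains m va hc, List.map_map]
      have hfilter : t.filter (fun p => !(m.insert ka va).contains p.1)
          = ((ka, va) :: t).filter (fun p => !m.contains p.1) := by
        rw [List.filter_cons_of_neg (by simp [hc])]
        apply List.filter_congr
        intro p hp
        rw [PySem.Dict.contains_insert]
        simp [hknt p hp]
      rw [hfilter]
      congr 1
      apply List.map_congr_left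
      rintro ⟨pk, pv⟩ hp
      by_cases hpk : pk = ka
      · subst hpk
        have h1 : ((fun p => (p.1, (PySem.Dict.mk t).getD p.1 p.2)) ∘
            fun p => if (p.1 == pk) = true then (pk, va) else p) (pk, pv) = (pk, va) := by
          simp [hgt va]
        have h2 : (PySem.Dict.mk ((pk, va) :: t)).getD pk pv = va := by
          simp [PySem.Dict.getD_eq_get?_getD, PySem.Dict.get?, List.find?]
        rw [h1, h2]
      · simp only [Function.comp, beq_iff_eq, if_neg hpk]
        exact congrArg (Prod.mk pk) (hDcons pk pv hpk).symm
    · rw [ih (m.insert ka va) (PySem.Dict.nodup_keys_insert _ _ _ hm) hl.2]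
      rw [PySem.Dict.items_insert_of_not_contains m va (by simpa using hc)]
      rw [List.filter_cons_of_pos (by simp [hc])]
      have hkm : ∀ p ∈ m.items, p.1 ≠ ka := by
        intro p hp hcontra
        have : m.contains p.1 = true := by
          rw [PySem.Dict.contains_eq_decide_mem_keys]
          simp only [PySem.Dict.keys]
          exact decide_eq_true (List.mem_map_of_mem hp)
        rw [hcontra] at this
        exact absurd this (by simpa using hc)
      have hfilter : t.filter (fun p => !(m.insert ka va).contains p.1)
          = t.filter (fun p => !m.contains p.1) := by
        apply List.filter_congr
        intro p hp
        rw [PySem.Dict.contains_insert]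
        simp [hknt p hp]
      rw [hfilter, List.map_append]
      simp only [List.map_cons, List.map_nil]
      rw [hgt va]
      have hbody : m.items.map (fun p => (p.1, (PySem.Dict.mk t).getD p.1 p.2))
          = m.items.map (fun p => (p.1, (PySem.Dict.mk ((ka, va) :: t)).getD p.1 p.2)) := by
        apply List.map_congr_left
        intro p hp
        rw [hDcons p.1 p.2 (hkm p hp)]
      rw [hbody, List.append_assoc]
      rfl

-- lookup in the filtered dict agrees with lookup in the full dict at keys e already binds
lemma getD_mk_filter (e : PySem.Dict String String) :
    ∀ (l : List (String × String)), (l.map Prod.fst).Nodup →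
      ∀ (k v : String), e.get? k = some v →
      (PySem.Dict.mk (l.filter (fun kv => decide (e.get? kv.1 ≠ some kv.2)))).getD k v
        = (PySem.Dict.mk l).getD k v := by
  intro l
  induction l with
  | nil => intro _ _ _ _; rfl
  | cons kv t ih =>
    obtain ⟨ka, va⟩ := kv
    intro hl k v hk
    simp only [List.map_cons, List.nodup_cons] at hl
    by_cases hpk : ka = k
    · subst hpk
      have hgt : ∀ (v0 : String), (PySem.Dict.mk t).getD ka v0 = v0 := by
        intro v0
        apply PySem.Dict.getD_of_not_contains
        rw [PySem.Dict.contains_eq_decide_mem_keys]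
        simpa [PySem.Dict.keys] using hl.1
      by_cases hv : e.get? ka = some va
      · rw [List.filter_cons_of_neg (by simp [hv])]
        have : va = v := by rw [hv] at hk; exact Option.some_inj.mp hk
        subst this
        rw [ih hl.2 ka va hk, hgt]
        simp [PySem.Dict.getD_eq_get?_getD, PySem.Dict.get?, List.find?]
      · rw [List.filter_cons_of_pos (by simp [hv])]
        simp [PySem.Dict.getD_eq_get?_getD, PySem.Dict.get?, List.find?]
    · have hstep : ∀ (rest : List (String × String)),
          (PySem.Dict.mk ((ka, va) :: rest)).getD k v = (PySem.Dict.mk rest).getD k v := by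
        intro rest
        simp only [PySem.Dict.getD_eq_get?_getD, PySem.Dict.get?]
        rw [List.find?_cons_of_neg (by simp [hpk])]
      by_cases hv : e.get? ka = some va
      · rw [List.filter_cons_of_neg (by simp [hv]), hstep, ih hl.2 k v hk]
      · rw [List.filter_cons_of_pos (by simp [hv]), hstep, hstep, ih hl.2 k v hk]

-- ===== VERDICT (by name: the statement is the Claim_ definition above) =====
theorem merge_key_values_spec : Claim_equal_merge_key_values := by
  intro existing additions _ hpre
  unfold Spec_merge_key_values merge_key_values merge_key_values_alt
  obtain ⟨hE, hA⟩ := hpre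
  simp only []
  have hekeys : (PySem.Dict.mk existing).keys.Nodup := by
    simpa [PySem.Dict.keys] using hE
  -- A's loop reduced to a plain insert-fold plus an `any`
  rw [loopA_eq (PySem.Dict.mk existing) additions (PySem.Dict.mk existing) false hekeys hA
    (fun _ _ => rfl)]
  -- 1. the merged dicts agree
  have hmv : (additions.foldl (fun d kv => d.insert kv.1 kv.2) (PySem.Dict.mk existing)).items
      = existing.map (fun p => (p.1, (PySem.Dict.mk additions).getD p.1 p.2))
        ++ additions.filter (fun kv => !(PySem.Dict.mk existing).contains kv.1) := by
    rw [foldl_insert_items additions (PySem.Dict.mk existing) hekeys hA]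
  -- B's second stage: inserting only fresh, distinct keys appends
  have hdnsub : ((additions.filter (fun kv => decide ((PySem.Dict.mk existing).get? kv.1 ≠ some kv.2))).filter
      (fun kv => !(PySem.Dict.mk existing).contains kv.1)).Sublist additions :=
    List.filter_sublist.trans List.filter_sublist
  have hdnnodup : (((additions.filter (fun kv => decide ((PySem.Dict.mk existing).get? kv.1 ≠ some kv.2))).filter
      (fun kv => !(PySem.Dict.mk existing).contains kv.1)).map Prod.fst).Nodup :=
    (hdnsub.map Prod.fst).nodup hA
  have hdnfresh : ∀ p ∈ (additions.filter (fun kv => decide ((PySem.Dict.mk existing).get? kv.1 ≠ some kv.2))).filter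
      (fun kv => !(PySem.Dict.mk existing).contains kv.1),
      (PySem.Dict.mk (existing.map (fun kv =>
        (kv.1, (PySem.Dict.mk (additions.filter (fun kv => decide ((PySem.Dict.mk existing).get? kv.1 ≠ some kv.2)))).getD kv.1 kv.2)))).contains p.1 = false := by
    intro p hp
    have hne : p.1 ∉ existing.map Prod.fst := by
      have h2 := (List.mem_filter.mp hp).2
      simp only [Bool.not_eq_true', PySem.Dict.contains_eq_decide_mem_keys,
        decide_eq_false_iff_not] at h2
      simpa [PySem.Dict.keys] using h2
    rw [PySem.Dict.contains_eq_decide_mem_keys]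
    simp only [PySem.Dict.keys, List.map_map, decide_eq_false_iff_not]
    intro hmem
    apply hne
    obtain ⟨q, hq, hqe⟩ := List.mem_map.mp hmem
    exact List.mem_map.mpr ⟨q, hq, by simpa using hqe⟩
  have hBitems := PySem.Dict.items_foldl_insert_fresh
    (l := (additions.filter (fun kv => decide ((PySem.Dict.mk existing).get? kv.1 ≠ some kv.2))).filter
      (fun kv => !(PySem.Dict.mk existing).contains kv.1))
    (d := PySem.Dict.mk (existing.map (fun kv =>
      (kv.1, (PySem.Dict.mk (additions.filter (fun kv => decide ((PySem.Dict.mk existing).get? kv.1 ≠ some kv.2)))).getD kv.1 kv.2))))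
    (k := Prod.fst) (v := Prod.snd) hdnfresh hdnnodup
  simp only [Prod.mk.injEq]
  constructor
  · -- items agree
    rw [hmv]
    have hB : ((additions.filter (fun kv => decide ((PySem.Dict.mk existing).get? kv.1 ≠ some kv.2))).filter
          (fun kv => !(PySem.Dict.mk existing).contains kv.1)).foldl
          (fun d kv => d.insert kv.1 kv.2)
          (PySem.Dict.mk (existing.map (fun kv =>
            (kv.1, (PySem.Dict.mk (additions.filter (fun kv => decide ((PySem.Dict.mk existing).get? kv.1 ≠ some kv.2)))).getD kv.1 kv.2))))
        = ((additions.filter (fun kv => decide ((PySem.Dict.mk existing).get? kv.1 ≠ some kv.2))).filter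
          (fun kv => !(PySem.Dict.mk existing).contains kv.1)).foldl
          (fun d a => d.insert a.1 a.2)
          (PySem.Dict.mk (existing.map (fun kv =>
            (kv.1, (PySem.Dict.mk (additions.filter (fun kv => decide ((PySem.Dict.mk existing).get? kv.1 ≠ some kv.2)))).getD kv.1 kv.2)))) := rfl
    rw [hB, hBitems]
    -- 1a. the override maps agree at every existing key
    have hover : existing.map (fun kv =>
        (kv.1, (PySem.Dict.mk (additions.filter (fun kv => decide ((PySem.Dict.mk existing).get? kv.1 ≠ some kv.2)))).getD kv.1 kv.2))
        = existing.map (fun p => (p.1, (PySem.Dict.mk additions).getD p.1 p.2)) := by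
      apply List.map_congr_left
      intro p hp
      have hk : (PySem.Dict.mk existing).get? p.1 = some p.2 :=
        PySem.Dict.get?_of_mem_items (PySem.Dict.mk existing) hp hekeys
      rw [getD_mk_filter (PySem.Dict.mk existing) additions hA p.1 p.2 hk]
    -- 1b. the appended fresh lists agree
    have hnew : (additions.filter (fun kv => decide ((PySem.Dict.mk existing).get? kv.1 ≠ some kv.2))).filter
          (fun kv => !(PySem.Dict.mk existing).contains kv.1)
        = additions.filter (fun kv => !(PySem.Dict.mk existing).contains kv.1) := by
      rw [List.filter_filter]
      apply List.filter_congr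
      intro p _
      by_cases hc : (PySem.Dict.mk existing).contains p.1
      · rw [hc]
        simp only [Bool.not_true, Bool.false_and]
      · have hcf : (PySem.Dict.mk existing).contains p.1 = false := by
          rcases Bool.eq_false_or_eq_true ((PySem.Dict.mk existing).contains p.1) with h | h
          · exact absurd h hc
          · exact h
        have hnone : (PySem.Dict.mk existing).get? p.1 = none := by
          rw [PySem.Dict.get?_eq_none_iff_contains]
          exact hcf
        rw [hcf, hnone]
        simp
    rw [hover, hnew]
    simp
  · -- the change flags agree
    rw [Bool.false_or]
    rcases Bool.eq_false_or_eq_true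
      (additions.any (fun kv => decide ((PySem.Dict.mk existing).get? kv.1 ≠ some kv.2))) with h | h
    · rw [h]
      obtain ⟨x, hx, hPx⟩ := List.any_eq_true.mp h
      have hmemf : x ∈ additions.filter (fun kv => decide ((PySem.Dict.mk existing).get? kv.1 ≠ some kv.2)) :=
        List.mem_filter.mpr ⟨hx, hPx⟩
      symm
      simp only [decide_eq_true_iff]
      intro hnil
      rw [hnil] at hmemf
      exact absurd hmemf (List.not_mem_nil)
    · rw [h]
      have hall := List.any_eq_false.mp h
      have hfe : additions.filter (fun kv => decide ((PySem.Dict.mk existing).get? kv.1 ≠ some kv.2)) = [] := by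
        apply List.filter_eq_nil_iff.mpr
        intro a ha
        exact hall a ha
      show false = decide ((additions.filter (fun kv => decide ((PySem.Dict.mk existing).get? kv.1 ≠ some kv.2))) ≠ [])
      rw [hfe]
      decide
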